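-- pv_equiv track=rewrite | github.com/xiaowh7/SemEval-2015-Task-10 | src/scoreCalculator.py | pariScoreCaculator
-- ===== SOURCE A (Python) =====
-- def pariScoreCaculator(tmpNgram1, tmpNgram2, pairgram,
--                 count, lastscore, maxscore,
--                 negcnt, neglast, negmax, negscore,
--                 poscnt, poslast, posmax, posscore):
--     for i in range(len(tmpNgram1)):
--         for j in range(len(tmpNgram2)):
--             phrase = tmpNgram1[i] + '---' + tmpNgram2[j]
--             if phrase in pairgram:
--                 score = pairgram[phrase]
--                 # print phrase
--                 if score > 0:
--                     posscore += score
--                     poscnt += 1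
--                     count += 1
--                     if score > posmax:
--                         posmax = score
--                     if score > maxscore:
--                         maxscore = score
--                     poslast = score
--                 elif score < 0:
--                     negscore += score
--                     negcnt += 1
--                     count += 1
--                     if abs(score) > negmax:
--                         negmax = abs(score)
--                     if abs(score) > maxscore:
--                         maxscore = abs(score)
--                     neglast = score
--
--                 lastscore = score
--     return count, lastscore, maxscore, \
--            negcnt, neglast, negmax, negscore, \
--            poscnt, poslast, posmax, posscore
-- ===== SOURCE B (Python) =====
-- # B: memoizes, per distinct ngram1 element, a pure one-pass summary of its matches against
-- # tmpNgram2, then merges summaries into the running state (same result as A's nested loops;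
-- # faster when tmpNgram1 has repeated n-grams).
--
-- def _summarize(x, tmpNgram2, pairgram):
--     pc = ps = nc = ns = 0
--     pm = pl = nm = nl = am = la = None
--     for y in tmpNgram2:
--         score = pairgram.get(x + '---' + y)
--         if score is None:
--             continue
--         if score > 0:
--             pc += 1
--             ps += score
--             pm = score if pm is None or score > pm else pm
--             am = score if am is None or score > am else am
--             pl = score
--         elif score < 0:
--             nc += 1
--             ns += score
--             a = -score
--             nm = a if nm is None or a > nm else nm
--             am = a if am is None or a > am else am
--             nl = score
--         la = score
--     return (pc, ps, pm, pl, nc, ns, nm, nl, am, la)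
--
--
-- def _apply(state, summ):
--     (count, lastscore, maxscore, negcnt, neglast, negmax, negscore,
--      poscnt, poslast, posmax, posscore) = state
--     pc, ps, pm, pl, nc, ns, nm, nl, am, la = summ
--     count += pc + nc
--     poscnt += pc
--     posscore += ps
--     negcnt += nc
--     negscore += ns
--     if pm is not None and pm > posmax:
--         posmax = pm
--     if nm is not None and nm > negmax:
--         negmax = nm
--     if am is not None and am > maxscore:
--         maxscore = am
--     if pl is not None:
--         poslast = pl
--     if nl is not None:
--         neglast = nl
--     if la is not None:
--         lastscore = la
--     return (count, lastscore, maxscore, negcnt, neglast, negmax, negscore,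
--             poscnt, poslast, posmax, posscore)
--
--
-- def pariScoreCaculator(tmpNgram1, tmpNgram2, pairgram,
--                 count, lastscore, maxscore,
--                 negcnt, neglast, negmax, negscore,
--                 poscnt, poslast, posmax, posscore):
--     memo = {}
--     state = (count, lastscore, maxscore, negcnt, neglast, negmax, negscore,
--              poscnt, poslast, posmax, posscore)
--     for x in tmpNgram1:
--         if x not in memo:
--             memo[x] = _summarize(x, tmpNgram2, pairgram)
--         state = _apply(state, memo[x])
--     return state
-- ===== Notes on version B (the rewrite author's own statement) =====
-- stated objective: faster
-- what changed: B replaces A's re-run of the inner tmpNgram2 scan for every index of tmpNgram1 by a memo dict: one pure summary (counts, sums, maxima, last scores) per DISTINCT ngram1 element, computed once and merged into the running state per occurrence.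
import Mathlib
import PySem

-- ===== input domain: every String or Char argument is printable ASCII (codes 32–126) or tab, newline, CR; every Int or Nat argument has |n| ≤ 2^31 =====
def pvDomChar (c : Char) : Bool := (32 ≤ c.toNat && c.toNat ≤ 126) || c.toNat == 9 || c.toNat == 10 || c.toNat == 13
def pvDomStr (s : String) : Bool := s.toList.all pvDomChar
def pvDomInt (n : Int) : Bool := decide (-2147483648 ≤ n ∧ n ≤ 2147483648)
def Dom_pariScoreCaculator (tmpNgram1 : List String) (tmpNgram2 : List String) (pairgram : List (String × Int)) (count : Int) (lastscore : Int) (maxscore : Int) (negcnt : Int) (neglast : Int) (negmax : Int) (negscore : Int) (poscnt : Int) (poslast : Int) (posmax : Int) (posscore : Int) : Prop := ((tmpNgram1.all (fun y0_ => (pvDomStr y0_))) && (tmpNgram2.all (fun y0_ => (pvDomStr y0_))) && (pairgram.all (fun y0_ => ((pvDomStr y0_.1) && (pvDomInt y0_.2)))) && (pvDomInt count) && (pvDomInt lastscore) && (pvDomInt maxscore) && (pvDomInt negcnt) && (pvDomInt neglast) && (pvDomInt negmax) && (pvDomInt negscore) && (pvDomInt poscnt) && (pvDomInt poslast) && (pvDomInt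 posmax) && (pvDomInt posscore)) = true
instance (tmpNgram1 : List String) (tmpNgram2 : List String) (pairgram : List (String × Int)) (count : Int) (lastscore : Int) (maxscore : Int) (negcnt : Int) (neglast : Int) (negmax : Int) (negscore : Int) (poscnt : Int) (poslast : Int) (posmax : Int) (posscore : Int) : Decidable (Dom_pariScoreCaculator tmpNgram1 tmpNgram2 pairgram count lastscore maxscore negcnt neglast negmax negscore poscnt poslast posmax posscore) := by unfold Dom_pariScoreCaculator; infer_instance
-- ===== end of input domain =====

-- B memoizes a per-distinct-ngram1 summary of the inner pass over tmpNgram2 and merges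
-- summaries into the state, instead of A's re-run of the inner loop for every index
-- (equal return value; equivalence is about the RETURN value only).

-- the running 11-field state both Pythons thread through their loops
structure PvSt where
  count : Int
  lastscore : Int
  maxscore : Int
  negcnt : Int
  neglast : Int
  negmax : Int
  negscore : Int
  poscnt : Int
  poslast : Int
  posmax : Int
  posscore : Int
deriving Repr, DecidableEq

def pvStList (s : PvSt) : List Int :=
  [s.count, s.lastscore, s.maxscore, s.negcnt, s.neglast, s.negmax, s.negscore,
   s.poscnt, s.poslast, s.posmax, s.posscore]

-- dict lookup 'pairgram.get(phrase)' / 'phrase in pairgram … pairgram[phrase]'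
def pvGet (pairgram : List (String × Int)) (k : String) : Option Int :=
  PySem.Dict.get? ⟨pairgram⟩ k

-- ===== PORT A =====
-- body of A's inner loop: match, then the branch updates, then 'lastscore = score'
def pvStepA (pairgram : List (String × Int)) (x y : String) (s : PvSt) : PvSt :=
  match pvGet pairgram (x ++ "---" ++ y) with
  | none => s
  | some score =>
    if score > 0 then
      { s with posscore := s.posscore + score, poscnt := s.poscnt + 1, count := s.count + 1,
               posmax := if score > s.posmax then score else s.posmax,
               maxscore := if score > s.maxscore then score else s.maxscore,
               poslast := score, lastscore := score }
    else if score < 0 then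
      { s with negscore := s.negscore + score, negcnt := s.negcnt + 1, count := s.count + 1,
               negmax := if |score| > s.negmax then |score| else s.negmax,
               maxscore := if |score| > s.maxscore then |score| else s.maxscore,
               neglast := score, lastscore := score }
    else
      { s with lastscore := score }

-- 'for j in range(len(tmpNgram2)): …'
def pvInnerA (pairgram : List (String × Int)) (tmpNgram2 : List String) (x : String) (s : PvSt) : PvSt :=
  (PySem.List.pyRange 0 (tmpNgram2.length : Int) 1).foldl
    (fun s j => pvStepA pairgram x (PySem.List.pyGetD tmpNgram2 j "") s) s

def pariScoreCaculator (tmpNgram1 : List String) (tmpNgram2 : List String) (pairgram : List (String × Int)) (count : Int) (lastscore : Int) (maxscore : Int) (negcnt : Int) (neglast : Int) (negmax : Int) (negscore : Int) (poscnt : Int) (poslast : Int) (posmax : Int) (posscore : Int) : List Int :=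
  pvStList ((PySem.List.pyRange 0 (tmpNgram1.length : Int) 1).foldl
    (fun s i => pvInnerA pairgram tmpNgram2 (PySem.List.pyGetD tmpNgram1 i "") s)
    ⟨count, lastscore, maxscore, negcnt, neglast, negmax, negscore, poscnt, poslast, posmax, posscore⟩)

-- ===== PORT B =====
-- pure summary of one ngram1 element's matches against all of tmpNgram2
structure PvSum where
  pc : Int
  ps : Int
  pm : Option Int
  pl : Option Int
  nc : Int
  ns : Int
  nm : Option Int
  nl : Option Int
  am : Option Int
  la : Option Int
deriving Repr, DecidableEq

def pvSumEmpty : PvSum := ⟨0, 0, none, none, 0, 0, none, none, none, none⟩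

-- 'v if o is None or v > o else o'
def pvOMax (o : Option Int) (v : Int) : Option Int :=
  match o with
  | none => some v
  | some m => some (if v > m then v else m)

def pvSumStep (pairgram : List (String × Int)) (x y : String) (a : PvSum) : PvSum :=
  match pvGet pairgram (x ++ "---" ++ y) with
  | none => a
  | some score =>
    if score > 0 then
      { a with pc := a.pc + 1, ps := a.ps + score, pm := pvOMax a.pm score,
               am := pvOMax a.am score, pl := some score, la := some score }
    else if score < 0 then
      { a with nc := a.nc + 1, ns := a.ns + score, nm := pvOMax a.nm (-score),
               am := pvOMax a.am (-score), nl := some score, la := some score }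
    else
      { a with la := some score }

def pvSummarize (pairgram : List (String × Int)) (x : String) (tmpNgram2 : List String) : PvSum :=
  tmpNgram2.foldl (fun a y => pvSumStep pairgram x y a) pvSumEmpty

-- merge a summary into the running state (_apply in Source B)
def pvApply (s : PvSt) (a : PvSum) : PvSt :=
  { count := s.count + (a.pc + a.nc),
    lastscore := a.la.getD s.lastscore,
    maxscore := match a.am with | none => s.maxscore | some v => if v > s.maxscore then v else s.maxscore,
    negcnt := s.negcnt + a.nc,
    neglast := a.nl.getD s.neglast,
    negmax := match a.nm with | none => s.negmax | some v => if v > s.negmax then v else s.negmax,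
    negscore := s.negscore + a.ns,
    poscnt := s.poscnt + a.pc,
    poslast := a.pl.getD s.poslast,
    posmax := match a.pm with | none => s.posmax | some v => if v > s.posmax then v else s.posmax,
    posscore := s.posscore + a.ps }

def pariScoreCaculator_alt (tmpNgram1 : List String) (tmpNgram2 : List String) (pairgram : List (String × Int)) (count : Int) (lastscore : Int) (maxscore : Int) (negcnt : Int) (neglast : Int) (negmax : Int) (negscore : Int) (poscnt : Int) (poslast : Int) (posmax : Int) (posscore : Int) : List Int :=
  pvStList (tmpNgram1.foldl
    (fun (p : PvSt × PySem.Dict String PvSum) x =>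
      let memo := if p.2.contains x then p.2 else p.2.insert x (pvSummarize pairgram x tmpNgram2)
      (pvApply p.1 (memo.getD x pvSumEmpty), memo))
    (⟨count, lastscore, maxscore, negcnt, neglast, negmax, negscore, poscnt, poslast, posmax, posscore⟩, PySem.Dict.empty)).1

-- ===== PRECONDITION & SPEC =====
def Spec_pariScoreCaculator (tmpNgram1 : List String) (tmpNgram2 : List String) (pairgram : List (String × Int)) (count : Int) (lastscore : Int) (maxscore : Int) (negcnt : Int) (neglast : Int) (negmax : Int) (negscore : Int) (poscnt : Int) (poslast : Int) (posmax : Int) (posscore : Int) (out : List Int) : Prop := out = pariScoreCaculator_alt tmpNgram1 tmpNgram2 pairgram count lastscore maxscore negcnt neglast negmax negscore poscnt poslast posmax posscore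
instance (tmpNgram1 : List String) (tmpNgram2 : List String) (pairgram : List (String × Int)) (count : Int) (lastscore : Int) (maxscore : Int) (negcnt : Int) (neglast : Int) (negmax : Int) (negscore : Int) (poscnt : Int) (poslast : Int) (posmax : Int) (posscore : Int) (out : List Int) : Decidable (Spec_pariScoreCaculator tmpNgram1 tmpNgram2 pairgram count lastscore maxscore negcnt neglast negmax negscore poscnt poslast posmax posscore out) := by unfold Spec_pariScoreCaculator; infer_instance

-- ===== CLAIM (what is proved, stated in full; the proofs are below) =====
def Claim_equal_pariScoreCaculator : Prop := ∀ (tmpNgram1 : List String) (tmpNgram2 : List String) (pairgram : List (String × Int)) (count : Int) (lastscore : Int) (maxscore : Int) (negcnt : Int) (neglast : Int) (negmax : Int) (negscore : Int) (poscnt : Int) (poslast : Int) (posmax : Int) (posscore : Int), Dom_pariScoreCaculator tmpNgram1 tmpNgram2 pairgram count lastscore maxscore negcnt neglast negmax negscore poscnt poslast posmax posscore → Spec_pariScoreCaculator tmpNgram1 tmpNgram2 pairgram count lastscore maxscore negcnt neglast negmax negscore poscnt poslast posmax posscore (pariScoreCaculator tmpNgram1 tmpNgram2 pairgram count lastscore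 maxscore negcnt neglast negmax negscore poscnt poslast posmax posscore)

-- ===== LEMMAS AND PROOFS =====

-- one inner step commutes with merging: A's step on a merged state = merging the bigger summary
theorem pvStepA_apply (pairgram : List (String × Int)) (x y : String) (s : PvSt) (a : PvSum) :
    pvStepA pairgram x y (pvApply s a) = pvApply s (pvSumStep pairgram x y a) := by
  cases h : pvGet pairgram (x ++ "---" ++ y) with
  | none => simp [pvStepA, pvSumStep, h]
  | some score =>
    rcases a with ⟨pc, ps, pm, pl, nc, ns, nm, nl, am, la⟩
    by_cases hp : score > 0
    · have habs : |score| = score := abs_of_pos hp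
      simp only [pvStepA, pvSumStep, h, if_pos hp]
      cases pm <;> cases am <;>
        simp [pvApply, pvOMax] <;> (try split_ifs) <;> omega
    · by_cases hn : score < 0
      · have habs : |score| = -score := abs_of_neg hn
        simp only [pvStepA, pvSumStep, h, if_neg hp, if_pos hn, habs]
        cases nm <;> cases am <;>
          simp [pvApply, pvOMax] <;> (try split_ifs) <;> omega
      · simp [pvStepA, pvSumStep, h, if_neg hp, if_neg hn, pvApply]

-- the whole inner pass commutes with merging
theorem pvFold_apply (pairgram : List (String × Int)) (x : String) (ys : List String)
    (s : PvSt) (a : PvSum) :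
    ys.foldl (fun s y => pvStepA pairgram x y s) (pvApply s a)
      = pvApply s (ys.foldl (fun a y => pvSumStep pairgram x y a) a) := by
  induction ys generalizing a with
  | nil => simp
  | cons y ys ih => simp only [List.foldl_cons, pvStepA_apply, ih]

theorem pvApply_empty (s : PvSt) : pvApply s pvSumEmpty = s := by
  cases s; simp [pvApply, pvSumEmpty]

-- A's inner loop over indices IS the list pass, and equals merging the summary
theorem pvInnerA_eq (pairgram : List (String × Int)) (tmpNgram2 : List String) (x : String)
    (s : PvSt) :
    pvInnerA pairgram tmpNgram2 x s = pvApply s (pvSummarize pairgram x tmpNgram2) := by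
  unfold pvInnerA pvSummarize
  rw [PySem.List.foldl_pyRange_zero_pyGetD' tmpNgram2 "" (fun s y => pvStepA pairgram x y s) s]
  calc tmpNgram2.foldl (fun s y => pvStepA pairgram x y s) s
      = tmpNgram2.foldl (fun s y => pvStepA pairgram x y s) (pvApply s pvSumEmpty) := by
        rw [pvApply_empty]
    _ = pvApply s (tmpNgram2.foldl (fun a y => pvSumStep pairgram x y a) pvSumEmpty) :=
        pvFold_apply ..

-- B's fold with its memo dictionary computes the same as merging fresh summaries,
-- as long as every memoised value is the true summary of its key
theorem pvFoldB_eq (pairgram : List (String × Int)) (tmpNgram2 : List String)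
    (xs : List String) (s : PvSt) (memo : PySem.Dict String PvSum)
    (hinv : ∀ k v, memo.get? k = some v → v = pvSummarize pairgram k tmpNgram2) :
    (xs.foldl
      (fun (p : PvSt × PySem.Dict String PvSum) x =>
        let memo := if p.2.contains x then p.2 else p.2.insert x (pvSummarize pairgram x tmpNgram2)
        (pvApply p.1 (memo.getD x pvSumEmpty), memo))
      (s, memo)).1
    = xs.foldl (fun s x => pvApply s (pvSummarize pairgram x tmpNgram2)) s := by
  induction xs generalizing s memo with
  | nil => rfl
  | cons x xs ih =>
    simp only [List.foldl_cons]
    set memo' := if memo.contains x then memo else memo.insert x (pvSummarize pairgram x tmpNgram2)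
      with hmemo'
    have hinv' : ∀ k v, memo'.get? k = some v → v = pvSummarize pairgram k tmpNgram2 := by
      intro k v hk
      rw [hmemo'] at hk
      by_cases hc : memo.contains x
      · exact hinv k v (by simpa [hc] using hk)
      · rw [if_neg hc, PySem.Dict.get?_insert] at hk
        by_cases hkx : k = x
        · subst hkx; simp at hk; exact hk.symm
        · exact hinv k v (by simpa [hkx] using hk)
    have hget : memo'.getD x pvSumEmpty = pvSummarize pairgram x tmpNgram2 := by
      rw [hmemo']
      by_cases hc : memo.contains x
      · rw [if_pos hc]
        have hsome : (memo.get? x).isSome := by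
          rw [← PySem.Dict.contains_eq_isSome_get?, hc]
        rcases Option.isSome_iff_exists.mp hsome with ⟨v, hv⟩
        rw [PySem.Dict.getD_eq_get?_getD, hv, Option.getD_some, hinv x v hv]
      · rw [if_neg hc, PySem.Dict.getD_eq_get?_getD, PySem.Dict.get?_insert_self,
          Option.getD_some]
    rw [hget]
    exact ih (pvApply s (pvSummarize pairgram x tmpNgram2)) memo' hinv'

-- ===== VERDICT (by name: the statement is the Claim_ definition above) =====
theorem pariScoreCaculator_spec : Claim_equal_pariScoreCaculator := by
  intro tmpNgram1 tmpNgram2 pairgram count lastscore maxscore negcnt neglast negmax negscore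
    poscnt poslast posmax posscore _hdom
  unfold Spec_pariScoreCaculator pariScoreCaculator pariScoreCaculator_alt
  rw [PySem.List.foldl_pyRange_zero_pyGetD' tmpNgram1 ""
    (fun s x => pvInnerA pairgram tmpNgram2 x s)]
  rw [pvFoldB_eq pairgram tmpNgram2 tmpNgram1 _ PySem.Dict.empty
    (by intro k v hk; simp [PySem.Dict.get?_empty] at hk)]
  rw [show (fun (s : PvSt) x => pvInnerA pairgram tmpNgram2 x s)
      = fun (s : PvSt) x => pvApply s (pvSummarize pairgram x tmpNgram2) from
    funext fun s => funext fun x => pvInnerA_eq ..]
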